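-- pv_equiv track=rewrite | github.com/v1yaa/Design-and-Analyses-of-Algorithm | Convex Hull of 2D Points.py | is_valid_edge
-- ===== SOURCE A (Python) =====
-- def orientation(p, q, r):
--     return (q[1] - p[1]) * (r[0] - q[0]) - (q[0] - p[0]) * (r[1] - q[1])
--
-- def is_valid_edge(points, p, q):
--     positive = negative = 0
--     for r in points:
--         if r != p and r != q:
--             orient = orientation(p, q, r)
--             if orient > 0:
--                 positive += 1
--             elif orient < 0:
--                 negative += 1
--         if positive and negative:
--             return False
--     return True
-- ===== SOURCE B (Python) =====
-- def orientation(p, q, r):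
--     return (q[1] - p[1]) * (r[0] - q[0]) - (q[0] - p[0]) * (r[1] - q[1])
--
-- def is_valid_edge(points, p, q):
--     os = sorted(orientation(p, q, r) for r in points if r != p and r != q)
--     return not os or os[0] >= 0 or os[-1] <= 0
-- ===== Notes on version B (the rewrite author's own statement) =====
-- stated objective: alternative
-- what changed: Sort-then-endpoint-check: B sorts the orientation values of the non-endpoint points and decides validity by inspecting only the smallest (os[0]) and largest (os[-1]) value, instead of A's fused loop maintaining positive/negative counters with an early exit; correct because signs are mixed iff the minimum is negative and the maximum is positive.
import Mathlib
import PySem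

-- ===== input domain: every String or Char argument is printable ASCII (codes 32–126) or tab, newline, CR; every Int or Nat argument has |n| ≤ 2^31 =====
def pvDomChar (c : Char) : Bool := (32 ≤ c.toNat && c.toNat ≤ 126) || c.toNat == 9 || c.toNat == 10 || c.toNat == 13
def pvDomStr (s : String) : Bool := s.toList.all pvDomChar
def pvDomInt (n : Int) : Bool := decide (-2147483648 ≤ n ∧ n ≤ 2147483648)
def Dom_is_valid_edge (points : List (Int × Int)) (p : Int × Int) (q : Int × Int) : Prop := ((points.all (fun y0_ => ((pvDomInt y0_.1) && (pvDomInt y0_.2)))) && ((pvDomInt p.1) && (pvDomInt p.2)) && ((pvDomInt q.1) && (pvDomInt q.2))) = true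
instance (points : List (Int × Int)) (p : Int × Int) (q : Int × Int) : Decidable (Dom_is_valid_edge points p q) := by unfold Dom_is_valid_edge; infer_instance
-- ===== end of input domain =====

-- B replaces A's fused positive/negative-counter loop with early exit by a different
-- algorithm: sort the orientation values and decide by inspecting only the two extremes
-- (objective: alternative; same result, signs are mixed iff min < 0 < max).

-- ===== PORT A =====
def pyOrientation (p q r : Int × Int) : Int :=
  (q.2 - p.2) * (r.1 - q.1) - (q.1 - p.1) * (r.2 - q.2)

-- the for-loop of A with its two counters and the early `return False`
def is_valid_edge_loop (p q : Int × Int) : List (Int × Int) → Int → Int → Bool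
  | [], _, _ => true
  | r :: rest, positive, negative =>
    let s : Int × Int :=
      if r ≠ p ∧ r ≠ q then
        let orient := pyOrientation p q r
        if orient > 0 then (positive + 1, negative)
        else if orient < 0 then (positive, negative + 1)
        else (positive, negative)
      else (positive, negative)
    if s.1 ≠ 0 ∧ s.2 ≠ 0 then false
    else is_valid_edge_loop p q rest s.1 s.2

def is_valid_edge (points : List (Int × Int)) (p : Int × Int) (q : Int × Int) : Bool :=
  is_valid_edge_loop p q points 0 0

-- ===== PORT B =====
def is_valid_edge_alt (points : List (Int × Int)) (p : Int × Int) (q : Int × Int) : Bool :=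
  let os := PySem.List.sorted
      ((points.filter (fun r => r ≠ p ∧ r ≠ q)).map (pyOrientation p q)) (fun x => x) false
  decide (os = []) || decide (PySem.List.pyGetD os 0 0 ≥ 0)
    || decide (PySem.List.pyGetD os (-1) 0 ≤ 0)

-- ===== PRECONDITION & SPEC =====
def Spec_is_valid_edge (points : List (Int × Int)) (p : Int × Int) (q : Int × Int) (out : Bool) : Prop := out = is_valid_edge_alt points p q
instance (points : List (Int × Int)) (p : Int × Int) (q : Int × Int) (out : Bool) : Decidable (Spec_is_valid_edge points p q out) := by unfold Spec_is_valid_edge; infer_instance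

-- ===== CLAIM (what is proved, stated in full; the proofs are below) =====
def Claim_equal_is_valid_edge : Prop := ∀ (points : List (Int × Int)) (p : Int × Int) (q : Int × Int), Dom_is_valid_edge points p q → Spec_is_valid_edge points p q (is_valid_edge points p q)

-- ===== LEMMAS AND PROOFS =====

-- characterisation of A's loop: with legal counters it returns true iff neither sign
-- class becomes inhabited on both sides
lemma loop_char (p q : Int × Int) :
    ∀ (l : List (Int × Int)) (pos neg : Int), 0 ≤ pos → 0 ≤ neg → ¬ (0 < pos ∧ 0 < neg) →
    is_valid_edge_loop p q l pos neg =
      !((decide (0 < pos) || (l.filter (fun r => r ≠ p ∧ r ≠ q)).any (fun r => decide (0 < pyOrientation p q r)))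
        && (decide (0 < neg) || (l.filter (fun r => r ≠ p ∧ r ≠ q)).any (fun r => decide (pyOrientation p q r < 0)))) := by
  intro l
  induction l with
  | nil =>
    intro pos neg hpos hneg hne
    simp [is_valid_edge_loop]
    omega
  | cons r rest ih =>
    intro pos neg hpos hneg hne
    by_cases hrp : r ≠ p ∧ r ≠ q
    · by_cases h1 : 0 < pyOrientation p q r
      · simp only [is_valid_edge_loop, if_pos hrp, if_pos h1]
        by_cases h2 : 0 < pos + 1 ∧ neg ≠ 0
        · have : (pos + 1 ≠ 0 ∧ neg ≠ 0) := by omega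
          simp only [if_pos this]
          have hn : 0 < neg := by omega
          simp [hrp, h1, hn]
        · have : ¬ (pos + 1 ≠ 0 ∧ neg ≠ 0) := by omega
          simp only [if_neg this]
          rw [ih (pos+1) neg (by omega) hneg (by omega)]
          have hn : ¬ 0 < neg := by omega
          have h3 : ¬ pyOrientation p q r < 0 := by omega
          simp [hrp, h1, hn, h3, hpos]
      · by_cases h3 : pyOrientation p q r < 0
        · simp only [is_valid_edge_loop, if_pos hrp, if_neg h1, if_pos h3]
          by_cases h2 : pos ≠ 0 ∧ neg + 1 ≠ 0
          · simp only [if_pos h2]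
            have hp : 0 < pos := by omega
            simp [hrp, h1, h3, hp]
          · simp only [if_neg h2]
            rw [ih pos (neg+1) hpos (by omega) (by omega)]
            have hp : ¬ 0 < pos := by omega
            have hn1 : (0:Int) < neg + 1 := by omega
            simp [hrp, h1, h3, hp, hn1]
        · have horient : pyOrientation p q r = 0 := by omega
          simp only [is_valid_edge_loop, if_pos hrp, if_neg h1, if_neg h3]
          have : ¬ (pos ≠ 0 ∧ neg ≠ 0) := by omega
          simp only [if_neg this]
          rw [ih pos neg hpos hneg hne]
          simp [hrp, h1, h3]
    · simp only [is_valid_edge_loop, if_neg hrp]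
      have : ¬ (pos ≠ 0 ∧ neg ≠ 0) := by omega
      simp only [if_neg this]
      rw [ih pos neg hpos hneg hne]
      simp [hrp]

-- in a ≤-pairwise list every element is bounded by the last one
lemma le_getLast_of_pairwise (l : List Int) (hl : l.Pairwise (· ≤ ·)) (h : l ≠ []) :
    ∀ x ∈ l, x ≤ l.getLast h := by
  intro x hx
  obtain ⟨i, hi, rfl⟩ := List.getElem_of_mem hx
  rw [List.getLast_eq_getElem]
  rcases Nat.lt_or_ge i (l.length - 1) with hlt | hge
  · exact List.pairwise_iff_getElem.mp hl i (l.length - 1) hi (by omega) hlt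
  · have hie : i = l.length - 1 := by omega
    simp [hie]

-- core equivalence: "no strictly mixed signs" = "sorted extremes test"
lemma sort_extremes_char (p q : Int × Int) (F : List (Int × Int)) :
    (!((F.any (fun r => decide (0 < pyOrientation p q r)))
        && (F.any (fun r => decide (pyOrientation p q r < 0))))) =
    (let os := PySem.List.sorted (F.map (pyOrientation p q)) (fun x => x) false
     decide (os = []) || decide (PySem.List.pyGetD os 0 0 ≥ 0)
       || decide (PySem.List.pyGetD os (-1) 0 ≤ 0)) := by
  set S := PySem.List.sorted (F.map (pyOrientation p q)) (fun x => x) false with hS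
  show _ = (decide (S = []) || decide (PySem.List.pyGetD S 0 0 ≥ 0)
       || decide (PySem.List.pyGetD S (-1) 0 ≤ 0))
  have hmemS : ∀ o, o ∈ S ↔ o ∈ F.map (pyOrientation p q) := by
    intro o; rw [hS]; exact PySem.List.mem_sorted _ _ _ o
  have hpw : S.Pairwise (· ≤ ·) := by
    have := PySem.List.sorted_pairwise (F.map (pyOrientation p q)) (fun x => x)
    simpa [← hS] using this
  have hanyPos : (F.any (fun r => decide (0 < pyOrientation p q r)))
      = (decide (∃ o ∈ S, 0 < o)) := by
    rw [Bool.eq_iff_iff]; simp [List.any_eq_true, hmemS]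
  have hanyNeg : (F.any (fun r => decide (pyOrientation p q r < 0)))
      = (decide (∃ o ∈ S, o < 0)) := by
    rw [Bool.eq_iff_iff]; simp [List.any_eq_true, hmemS]
  rw [hanyPos, hanyNeg]
  by_cases hSnil : S = []
  · simp [hSnil]
  · obtain ⟨m, t, hSc⟩ := List.exists_cons_of_ne_nil hSnil
    have hsortedEq : PySem.List.sorted (F.map (pyOrientation p q)) (fun x => x) false = m :: t := by
      rw [← hS]; exact hSc
    have hmin : ∀ y ∈ S, m ≤ y := by
      intro y hy
      exact PySem.List.key_head_sorted_le (F.map (pyOrientation p q)) (fun x => x) hsortedEq y ((hmemS y).mp hy)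
    have hmax : ∀ y ∈ S, y ≤ S.getLast hSnil :=
      le_getLast_of_pairwise S hpw hSnil
    have hget0 : PySem.List.pyGetD S 0 0 = m := by
      rw [hSc]; exact PySem.List.pyGetD_zero_cons m t 0
    have hgetm1 : PySem.List.pyGetD S (-1) 0 = S.getLast hSnil :=
      PySem.List.pyGetD_neg_one S 0 hSnil
    rw [hget0, hgetm1]
    have hmmem : m ∈ S := by rw [hSc]; exact List.mem_cons_self
    have hlastmem : S.getLast hSnil ∈ S := List.getLast_mem hSnil
    by_cases hneg : ∃ o ∈ S, o < 0
    · have hm : m < 0 := by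
        rcases hneg with ⟨o, ho, holt⟩
        exact lt_of_le_of_lt (hmin o ho) holt
      by_cases hpos : ∃ o ∈ S, 0 < o
      · have hlast : 0 < S.getLast hSnil := by
          rcases hpos with ⟨o, ho, holt⟩
          exact lt_of_lt_of_le holt (hmax o ho)
        simp [hneg, hpos, hSnil, not_le.mpr hm, not_le.mpr hlast]
      · have hlast : S.getLast hSnil ≤ 0 := by
          by_contra hc
          exact hpos ⟨S.getLast hSnil, hlastmem, by omega⟩
        simp [hneg, hpos, hSnil, hlast]
    · have hm : 0 ≤ m := by
        by_contra hc
        exact hneg ⟨m, hmmem, by omega⟩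
      simp [hneg, hSnil, hm]

-- ===== VERDICT (by name: the statement is the Claim_ definition above) =====
theorem is_valid_edge_spec : Claim_equal_is_valid_edge := by
  intro points p q _
  unfold Spec_is_valid_edge is_valid_edge is_valid_edge_alt
  rw [loop_char p q points 0 0 le_rfl le_rfl (by omega)]
  simp only [show decide ((0:Int) < 0) = false from rfl, Bool.false_or]
  exact sort_extremes_char p q (points.filter (fun r => r ≠ p ∧ r ≠ q))
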